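-- pv_equiv track=rewrite | github.com/qing10101/el4ner_scu | fair_evaluation.py | convert_to_iob2
-- ===== SOURCE A (Python) =====
-- def convert_to_iob2(text, entities):
--     """Converts a text and a dictionary of entities to IOB2 format."""
--     tokens = text.split()
--     tags = ['O'] * len(tokens)
--     if not entities or 'error' in entities:
--         return tokens, tags
--     for entity_text, entity_type in entities.items():
--         entity_tokens = entity_text.split()
--         for i in range(len(tokens) - len(entity_tokens) + 1):
--             if tokens[i:i + len(entity_tokens)] == entity_tokens:
--                 tags[i] = f'B-{entity_type}'
--                 for j in range(1, len(entity_tokens)):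
--                     tags[i + j] = f'I-{entity_type}'
--                 break
--     return tokens, tags
-- ===== SOURCE B (Python) =====
-- def convert_to_iob2(text, entities):
--     """Converts a text and a dictionary of entities to IOB2 format."""
--     tokens = text.split()
--     tags = ['O'] * len(tokens)
--     if not entities or 'error' in entities:
--         return tokens, tags
--     starts = {}  # token -> its positions in order: only these can start a match
--     for i, tok in enumerate(tokens):
--         starts.setdefault(tok, []).append(i)
--     for entity_text, entity_type in entities.items():
--         p = entity_text.split()
--         if not p:
--             continue
--         for i in starts.get(p[0], []):
--             if tokens[i:i + len(p)] == p:
--                 tags[i] = 'B-' + entity_type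
--                 tags[i + 1:i + len(p)] = ['I-' + entity_type] * (len(p) - 1)
--                 break
--     return tokens, tags
-- ===== Notes on version B (the rewrite author's own statement) =====
-- stated objective: alternative
-- what changed: B builds a one-pass index from token to its positions and, for each entity, probes only the positions where the entity's first token occurs (writing the I-tags by one slice assignment), instead of A's slice comparison at every window position; Pre_ excludes the inputs where A raises IndexError (empty token list with a whitespace-only entity key in a processed dict).
-- intended difference: On texts with at least one token whose processed entities dict contains a whitespace-only key, A tags the first token B-<type> because the empty token sequence trivially matches at index 0, while B leaves such vacuous entities untagged, which is the intended behaviour since a whitespace-only entity mention occurs nowhere in the text. — e.g. on convert_to_iob2("a b", [(" ", "X")]): A returns (["a", "b"], ["B-X", "O"]), B returns (["a", "b"], ["O", "O"])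
import Mathlib
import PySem

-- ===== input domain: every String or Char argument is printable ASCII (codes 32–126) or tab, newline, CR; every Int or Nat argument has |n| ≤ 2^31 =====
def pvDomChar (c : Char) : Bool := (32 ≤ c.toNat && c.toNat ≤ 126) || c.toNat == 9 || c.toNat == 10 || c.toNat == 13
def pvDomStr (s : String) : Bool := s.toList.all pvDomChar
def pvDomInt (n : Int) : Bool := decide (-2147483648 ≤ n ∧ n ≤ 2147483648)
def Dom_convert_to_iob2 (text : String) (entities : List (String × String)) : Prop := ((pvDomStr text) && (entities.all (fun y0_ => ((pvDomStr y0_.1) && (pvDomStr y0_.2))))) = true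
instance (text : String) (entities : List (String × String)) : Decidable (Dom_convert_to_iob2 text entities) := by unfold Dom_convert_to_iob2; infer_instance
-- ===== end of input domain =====

-- B replaces A's window scan over every position by a token→positions index probed only at the
-- positions where the entity's first token occurs, and skips entities whose text has no tokens.

-- ===== PORT A =====
-- 'for i in range(len(tokens)-len(entity_tokens)+1): if tokens[i:i+len] == entity_tokens: …; break'
-- ported as recursion over the remaining range list (break = stop recursing)
def pvALoop (tokens etoks : List String) (etype : String) (tags : List String) : List Int → List String
  | [] => tags
  | i :: rest =>
    if PySem.List.slice tokens (some i) (some (i + (etoks.length : Int))) = etoks then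
      let tags' := PySem.List.pySetD tags i ("B-" ++ etype)
      (PySem.List.pyRange 1 (etoks.length : Int) 1).foldl
        (fun t j => PySem.List.pySetD t (i + j) ("I-" ++ etype)) tags'
    else pvALoop tokens etoks etype tags rest

def convert_to_iob2 (text : String) (entities : List (String × String)) : List String × List String :=
  let tokens := PySem.Str.split₀ text
  let tags := List.replicate tokens.length "O"
  let d := PySem.Dict.ofList entities
  if d.items = [] ∨ d.contains "error" = true then (tokens, tags)
  else
    let tags := d.items.foldl (fun tags pr =>
      let etoks := PySem.Str.split₀ pr.1
      pvALoop tokens etoks pr.2 tags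
        (PySem.List.pyRange 0 ((tokens.length : Int) - (etoks.length : Int) + 1) 1)) tags
    (tokens, tags)

-- ===== PORT B =====
-- 'for i in starts.get(p[0], []): if tokens[i:i+len(p)] == p: …; break' — the search part
def pvBFind (tokens p : List String) : List Int → Option Int
  | [] => none
  | i :: rest =>
    if PySem.List.slice tokens (some i) (some (i + (p.length : Int))) = p then some i
    else pvBFind tokens p rest

-- tags[i] = 'B-'+t; tags[i+1:i+len(p)] = ['I-'+t]*(len(p)-1)
-- (i ≥ 0 here; slice assignment of an equal-length run is exact as take ++ replicate ++ drop)
def pvBTag (tags : List String) (idx : Int) (plen : Nat) (etype : String) : List String :=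
  let t := PySem.List.pySetD tags idx ("B-" ++ etype)
  t.take (idx.toNat + 1) ++ List.replicate (plen - 1) ("I-" ++ etype) ++ t.drop (idx.toNat + max plen 1)

def convert_to_iob2_alt (text : String) (entities : List (String × String)) : List String × List String :=
  let tokens := PySem.Str.split₀ text
  let tags := List.replicate tokens.length "O"
  let d := PySem.Dict.ofList entities
  if d.items = [] ∨ d.contains "error" = true then (tokens, tags)
  else
    -- starts.setdefault(tok, []).append(i)
    let starts := (PySem.List.enumerate tokens 0).foldl
      (fun s pr => s.modify pr.2 [] (· ++ [pr.1])) PySem.Dict.empty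
    let tags := d.items.foldl (fun tags pr =>
      match PySem.Str.split₀ pr.1 with
      | [] => tags                    -- 'if not p: continue'
      | p0 :: ps =>
        match pvBFind tokens (p0 :: ps) (starts.getD p0 []) with
        | none => tags
        | some idx => pvBTag tags idx (p0 :: ps).length pr.2) tags
    (tokens, tags)

-- ===== PRECONDITION & SPEC =====
-- Pre_ excludes exactly the inputs where the Python A raises IndexError: a text with no tokens
-- together with a processed (non-empty, no 'error' key) entities dict containing a
-- whitespace-only key, on which tags[0] = 'B-…' is executed against an empty tags list.
def Pre_convert_to_iob2 (text : String) (entities : List (String × String)) : Prop :=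
  PySem.Str.split₀ text ≠ [] ∨ entities = [] ∨ "error" ∈ entities.map Prod.fst ∨
    ∀ p ∈ entities, PySem.Str.split₀ p.1 ≠ []
instance (text : String) (entities : List (String × String)) : Decidable (Pre_convert_to_iob2 text entities) := by unfold Pre_convert_to_iob2; infer_instance

def pvWitness_convert_to_iob2 : String × (List (String × String)) :=
  ("Alice Smith went to Paris", [("Alice Smith", "PER"), ("Paris", "LOC")])

-- On texts with at least one token whose processed entities dict contains a whitespace-only key,
-- A tags the first token 'B-<type>' because the empty token sequence trivially matches at index 0,
-- while B leaves such vacuous entities untagged — the intended behaviour, since a whitespace-only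
-- entity mention occurs nowhere in the text.
def D_convert_to_iob2 (text : String) (entities : List (String × String)) : Prop :=
  PySem.Str.split₀ text ≠ [] ∧ entities ≠ [] ∧ "error" ∉ entities.map Prod.fst ∧
    ∃ p ∈ entities, PySem.Str.split₀ p.1 = []
instance (text : String) (entities : List (String × String)) : Decidable (D_convert_to_iob2 text entities) := by unfold D_convert_to_iob2; infer_instance

def Spec_convert_to_iob2 (text : String) (entities : List (String × String)) (out : List String × List String) : Prop := ¬ D_convert_to_iob2 text entities → out = convert_to_iob2_alt text entities
instance (text : String) (entities : List (String × String)) (out : List String × List String) : Decidable (Spec_convert_to_iob2 text entities out) := by unfold Spec_convert_to_iob2; infer_instance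

def pvDiffWitness_convert_to_iob2 : String × (List (String × String)) := ("a b", [(" ", "X")])
def pvDiffWitnessOut_convert_to_iob2 : (List String × List String) × (List String × List String) :=
  ((["a", "b"], ["B-X", "O"]), (["a", "b"], ["O", "O"]))

-- ===== CLAIM (what is proved, stated in full; the proofs are below) =====
def Claim_unchanged_convert_to_iob2 : Prop := ∀ (text : String) (entities : List (String × String)), Dom_convert_to_iob2 text entities → Pre_convert_to_iob2 text entities → Spec_convert_to_iob2 text entities (convert_to_iob2 text entities)
def Claim_changed_convert_to_iob2 : Prop := Dom_convert_to_iob2 (pvDiffWitness_convert_to_iob2.1) (pvDiffWitness_convert_to_iob2.2) ∧ Pre_convert_to_iob2 (pvDiffWitness_convert_to_iob2.1) (pvDiffWitness_convert_to_iob2.2) ∧ D_convert_to_iob2 (pvDiffWitness_convert_to_iob2.1) (pvDiffWitness_convert_to_iob2.2) ∧ convert_to_iob2 (pvDiffWitness_convert_to_iob2.1) (pvDiffWitness_convert_to_iob2.2) = pvDiffWitnessOut_convert_to_iob2.1 ∧ convert_to_iob2_alt (pvDiffWitness_convert_to_iob2.1) (pvDiffWitness_convert_to_iob2.2) = pvDiffWitnessOut_convert_to_iob2.2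 ∧ pvDiffWitnessOut_convert_to_iob2.1 ≠ pvDiffWitnessOut_convert_to_iob2.2

-- ===== LEMMAS AND PROOFS =====

-- find? with pointwise-equal predicates agrees (used to drop the redundant first-token test)
theorem pvFind?_congr_mem {α : Type} (p q : α → Bool) (l : List α)
    (h : ∀ a ∈ l, p a = q a) : l.find? p = l.find? q := by
  induction l with
  | nil => rfl
  | cons x xs ih =>
    simp only [List.find?_cons]
    rw [h x (by simp)]
    cases q x
    · exact ih (fun a ha => h a (by simp [ha]))
    · rfl

-- A's inner loop-with-break is: find the first matching index, then tag there
theorem pvALoop_eq (tokens etoks : List String) (etype : String) (tags : List String) (l : List Int) :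
    pvALoop tokens etoks etype tags l =
      match l.find? (fun i => decide (PySem.List.slice tokens (some i) (some (i + (etoks.length : Int))) = etoks)) with
      | none => tags
      | some i => (PySem.List.pyRange 1 (etoks.length : Int) 1).foldl
          (fun t j => PySem.List.pySetD t (i + j) ("I-" ++ etype)) (PySem.List.pySetD tags i ("B-" ++ etype)) := by
  induction l with
  | nil => rfl
  | cons x xs ih =>
    rw [pvALoop, List.find?_cons]
    by_cases h : PySem.List.slice tokens (some x) (some (x + (etoks.length : Int))) = etoks
    · simp [h]
    · simp [h, ih]

theorem pvBFind_eq (tokens p : List String) (l : List Int) :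
    pvBFind tokens p l = l.find? (fun i => decide (PySem.List.slice tokens (some i) (some (i + (p.length : Int))) = p)) := by
  induction l with
  | nil => rfl
  | cons x xs ih =>
    rw [pvBFind, List.find?_cons]
    by_cases h : PySem.List.slice tokens (some x) (some (x + (p.length : Int))) = p
    · simp [h]
    · simp [h, ih]

-- the token→positions dict, looked up at p0, is the filtered position range
theorem pvStarts_getD (tokens : List String) (p0 : String) :
    ((PySem.List.enumerate tokens 0).foldl (fun s pr => s.modify pr.2 [] (· ++ [pr.1])) (PySem.Dict.empty : PySem.Dict String (List Int))).getD p0 []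
      = (PySem.List.pyRange 0 (tokens.length : Int) 1).filter (fun i => PySem.List.pyGetD tokens i "" == p0) := by
  have h1 : (PySem.List.enumerate tokens 0).foldl (fun s pr => s.modify pr.2 [] (· ++ [pr.1])) (PySem.Dict.empty : PySem.Dict String (List Int))
      = ((PySem.List.enumerate tokens 0).map Prod.swap).foldl (fun s q => s.modify q.1 [] (· ++ [q.2])) PySem.Dict.empty := by
    rw [List.foldl_map]
    rfl
  rw [h1, PySem.Dict.getD_foldl_modify_append, PySem.Dict.getD_empty, List.nil_append,
    PySem.List.enumerate_eq_map_pyRange tokens ""]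
  rw [List.filter_map, List.filter_map, List.map_map, List.map_map]
  simp [Function.comp_def]

-- writing an equal-length run of I-tags by successive sets equals one splice
theorem pvSetRun (x : String) : ∀ (c : Nat) (t : List String) (s : Nat), s + c ≤ t.length →
    (List.range c).foldl (fun t r => t.set (s + r) x) t
      = t.take s ++ List.replicate c x ++ t.drop (s + c) := by
  intro c
  induction c with
  | zero => intro t s h; simp
  | succ c ih =>
    intro t s h
    rw [List.range_succ, List.foldl_append, ih t s (by omega)]
    simp only [List.foldl_cons, List.foldl_nil]
    have hs : s ≤ t.length := by omega
    have hl : (t.take s ++ List.replicate c x).length = s + c := by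
      simp [List.length_take, Nat.min_eq_left hs]
    have hdrop : t.drop (s + c) = t[s + c] :: t.drop (s + c + 1) :=
      List.drop_eq_getElem_cons (by omega)
    rw [List.set_append_right _ _ (by rw [hl]), hl, Nat.sub_self, hdrop]
    simp [List.replicate_succ', List.append_assoc, Nat.add_assoc]

theorem pvFoldl_set_len (x : String) (i : Int) (l : List Int) (t : List String) :
    (l.foldl (fun t j => PySem.List.pySetD t (i + j) x) t).length = t.length := by
  induction l generalizing t with
  | nil => rfl
  | cons a as ih => simp [ih, PySem.List.length_pySetD]

-- a window starting at i with i + m > len(tokens) cannot equal a pattern of length m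
theorem pvNoMatch (tokens p : List String) (i : Int) (h0 : 0 ≤ i)
    (hb : (tokens.length : Int) < i + p.length) (hm : p ≠ []) :
    PySem.List.slice tokens (some i) (some (i + (p.length : Int))) ≠ p := by
  intro he
  have hp := List.length_pos_iff.mpr hm
  obtain ⟨k, rfl⟩ := Int.eq_ofNat_of_zero_le h0
  have hlen := congrArg List.length he
  rw [PySem.List.slice_toNat _ (by omega) (by omega)] at hlen
  simp only [List.length_take, List.length_drop, ← Nat.cast_add, Int.toNat_natCast] at hlen
  omega

-- a matching window's first token is p0
theorem pvFirstTok (tokens : List String) (p0 : String) (ps : List String) (i : Int) (h0 : 0 ≤ i)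
    (he : PySem.List.slice tokens (some i) (some (i + ((p0 :: ps).length : Int))) = p0 :: ps) :
    PySem.List.pyGetD tokens i "" = p0 := by
  obtain ⟨k, rfl⟩ := Int.eq_ofNat_of_zero_le h0
  rw [PySem.List.slice_toNat _ (by omega) (by omega)] at he
  simp only [← Nat.cast_add, Int.toNat_natCast] at he
  have h1 : (tokens.drop k).head? = some p0 := by
    have h2 := congrArg List.head? he
    rw [List.head?_take, if_neg (by simp only [List.length_cons]; omega)] at h2
    simpa using h2
  rw [List.head?_drop] at h1
  rw [PySem.List.pyGetD_of_nonneg _ _ h0]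
  simp [List.getD_eq_getElem?_getD, Int.toNat_natCast, h1]

-- tagging: B at i then I at i+1 … i+m-1 equals the splice pvBTag performs
theorem pvTag_eq (tags : List String) (etype : String) (m : Nat) (i : Int) (h0 : 0 ≤ i)
    (hm : 1 ≤ m) (hb : i.toNat + m ≤ tags.length) :
    (PySem.List.pyRange 1 (m : Int) 1).foldl (fun t j => PySem.List.pySetD t (i + j) ("I-" ++ etype))
      (PySem.List.pySetD tags i ("B-" ++ etype)) = pvBTag tags i m etype := by
  obtain ⟨k, rfl⟩ := Int.eq_ofNat_of_zero_le h0
  rw [PySem.List.pyRange_one 1 m, List.foldl_map]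
  have hfun : (fun (t : List String) (r : Nat) => PySem.List.pySetD t ((k : Int) + (1 + (r : Int))) ("I-" ++ etype))
      = fun t r => t.set (k + 1 + r) ("I-" ++ etype) := by
    funext t r
    have h1 : ((k : Int) + ((1 : Int) + (r : Int))) = ((k + 1 + r : Nat) : Int) := by push_cast; ring
    rw [h1, PySem.List.pySetD_natCast]
  rw [hfun, PySem.List.pySetD_natCast]
  rw [show ((m : Int) - 1).toNat = m - 1 from by omega]
  rw [pvSetRun ("I-" ++ etype) (m - 1) (tags.set k ("B-" ++ etype)) (k + 1)
    (by simp only [List.length_set]; omega), pvBTag]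
  simp only [PySem.List.pySetD_natCast, Int.toNat_natCast]
  rw [show k + 1 + (m - 1) = k + max m 1 from by omega]

-- the per-entity step of A equals the per-entity step of B, for a non-empty pattern p0 :: ps
theorem step_core (tokens tags : List String) (etype : String) (p0 : String) (ps : List String)
    (hlen : tags.length = tokens.length) :
    pvALoop tokens (p0 :: ps) etype tags
      (PySem.List.pyRange 0 ((tokens.length : Int) - ((p0 :: ps).length : Int) + 1) 1)
    = (match pvBFind tokens (p0 :: ps)
          (((PySem.List.enumerate tokens 0).foldl
            (fun s pr => s.modify pr.2 [] (· ++ [pr.1])) PySem.Dict.empty).getD p0 []) with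
      | none => tags
      | some idx => pvBTag tags idx (p0 :: ps).length etype) := by
  simp only [pvALoop_eq, pvBFind_eq, pvStarts_getD, List.find?_filter]
  have hpt : ∀ a ∈ PySem.List.pyRange 0 (tokens.length : Int) 1,
      (decide ((PySem.List.pyGetD tokens a "" == p0) = true ∧
         decide (PySem.List.slice tokens (some a) (some (a + ((p0 :: ps).length : Int))) = p0 :: ps) = true))
      = (decide (PySem.List.slice tokens (some a) (some (a + ((p0 :: ps).length : Int))) = p0 :: ps)) := by
    intro a ha
    rw [PySem.List.mem_pyRange_one] at ha
    by_cases hp : PySem.List.slice tokens (some a) (some (a + ((ps.length : Int) + 1))) = p0 :: ps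
    · have hft := pvFirstTok tokens p0 ps a ha.1 hp
      simp [hp, hft]
    · simp [hp]
  rw [pvFind?_congr_mem _ _ _ hpt]
  by_cases hnm : 0 ≤ (tokens.length : Int) - ((p0 :: ps).length : Int) + 1
  · rw [PySem.List.pyRange_one_append 0 ((tokens.length : Int) - ((p0 :: ps).length : Int) + 1)
      (tokens.length : Int) hnm (by simp only [List.length_cons]; omega)]
    rw [List.find?_append]
    have hnone : (PySem.List.pyRange ((tokens.length : Int) - ((p0 :: ps).length : Int) + 1)
        (tokens.length : Int) 1).find?
        (fun i => decide (PySem.List.slice tokens (some i) (some (i + ((p0 :: ps).length : Int))) = p0 :: ps)) = none := by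
      rw [List.find?_eq_none]
      intro a ha
      rw [PySem.List.mem_pyRange_one] at ha
      simp only [decide_eq_true_eq]
      exact pvNoMatch tokens (p0 :: ps) a (by omega) (by simp only [List.length_cons] at *; omega) (by simp)
    rw [hnone, Option.or_none]
    cases hfind : (PySem.List.pyRange 0 ((tokens.length : Int) - ((p0 :: ps).length : Int) + 1) 1).find?
        (fun i => decide (PySem.List.slice tokens (some i) (some (i + ((p0 :: ps).length : Int))) = p0 :: ps)) with
    | none => rfl
    | some i =>
      have hmem := List.mem_of_find?_eq_some hfind
      rw [PySem.List.mem_pyRange_one] at hmem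
      have hpred := List.find?_some hfind
      simp only [decide_eq_true_eq] at hpred
      simp only
      exact pvTag_eq tags etype (p0 :: ps).length i hmem.1 (by simp)
        (by simp only [List.length_cons] at *; omega)
  · rw [PySem.List.pyRange_one_eq_nil (by omega), List.find?_nil]
    have hnone2 : (PySem.List.pyRange 0 (tokens.length : Int) 1).find?
        (fun i => decide (PySem.List.slice tokens (some i) (some (i + ((p0 :: ps).length : Int))) = p0 :: ps)) = none := by
      rw [List.find?_eq_none]
      intro a ha
      rw [PySem.List.mem_pyRange_one] at ha
      simp only [decide_eq_true_eq]
      exact pvNoMatch tokens (p0 :: ps) a (by omega) (by simp only [List.length_cons] at *; omega) (by simp)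
    rw [hnone2]

theorem step_len (tokens : List String) (tags : List String)
    (hlen : tags.length = tokens.length) (pr : String × String) :
    (pvALoop tokens (PySem.Str.split₀ pr.1) pr.2 tags
       (PySem.List.pyRange 0 ((tokens.length : Int) - ((PySem.Str.split₀ pr.1).length : Int) + 1) 1)).length = tokens.length := by
  rw [pvALoop_eq]
  cases (PySem.List.pyRange 0 ((tokens.length : Int) - ((PySem.Str.split₀ pr.1).length : Int) + 1) 1).find?
      (fun i => decide (PySem.List.slice tokens (some i) (some (i + ((PySem.Str.split₀ pr.1).length : Int))) = PySem.Str.split₀ pr.1)) with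
  | none => exact hlen
  | some i => rw [pvFoldl_set_len, PySem.List.length_pySetD]; exact hlen

theorem foldl_congr_inv_mem {α β : Type} (P : α → Prop) (f g : α → β → α)
    (hf : ∀ a b, P a → P (f a b)) :
    ∀ (l : List β) (a : α), (∀ b ∈ l, ∀ a', P a' → f a' b = g a' b) → P a → l.foldl f a = l.foldl g a := by
  intro l
  induction l with
  | nil => intro a _ _; rfl
  | cons x xs ih =>
    intro a h ha
    simp only [List.foldl_cons]
    rw [← h x (by simp) a ha]
    exact ih _ (fun b hb => h b (by simp [hb])) (hf a x ha)

-- keys of a dict built from an association list are exactly the list's keys (as a set)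
theorem pvMemKeysOfList (l : List (String × String)) (k : String) :
    k ∈ (PySem.Dict.ofList l).keys ↔ k ∈ l.map Prod.fst := by
  have h : (PySem.Dict.ofList l) = l.foldl (fun d p => d.insert p.1 p.2) PySem.Dict.empty := rfl
  rw [h, PySem.Dict.keys_foldl_insert_key l Prod.fst (fun d p => p.2) PySem.Dict.empty,
    PySem.Dict.keys_empty, PySem.Set.update_nil_left, PySem.Set.mem_ofList]

-- ===== VERDICT (by name: the statement is the Claim_ definition above) =====
theorem convert_to_iob2_spec : Claim_unchanged_convert_to_iob2 := by
  intro text entities _ hpre hnd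
  unfold convert_to_iob2 convert_to_iob2_alt
  simp only
  by_cases hc : (PySem.Dict.ofList entities).items = [] ∨ (PySem.Dict.ofList entities).contains "error" = true
  · rw [if_pos hc, if_pos hc]
  · rw [if_neg hc, if_neg hc]
    push Not at hc
    have hne : entities ≠ [] := by
      rintro rfl
      exact hc.1 rfl
    have herr : "error" ∉ entities.map Prod.fst := by
      intro hmem
      have : (PySem.Dict.ofList entities).contains "error" = true := by
        rw [PySem.Dict.contains_iff_mem_keys, pvMemKeysOfList]
        exact hmem
      exact absurd this hc.2
    have hall : ∀ p ∈ entities, PySem.Str.split₀ p.1 ≠ [] := by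
      unfold D_convert_to_iob2 at hnd
      unfold Pre_convert_to_iob2 at hpre
      push Not at hnd
      by_cases ht : PySem.Str.split₀ text = []
      · rcases hpre with h | h | h | h
        · exact absurd ht h
        · exact absurd h hne
        · exact absurd h herr
        · exact h
      · intro p hp hsplit
        exact (hnd ht hne herr p hp) hsplit
    have hitems : ∀ pr ∈ (PySem.Dict.ofList entities).items, PySem.Str.split₀ pr.1 ≠ [] := by
      intro pr hpr
      have hk : pr.1 ∈ entities.map Prod.fst := by
        rw [← pvMemKeysOfList]
        exact PySem.Dict.mem_keys_of_mem_items _ hpr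
      obtain ⟨q, hq, hq1⟩ := List.mem_map.mp hk
      rw [← hq1]
      exact hall q hq
    refine congrArg (fun t => (PySem.Str.split₀ text, t)) ?_
    apply foldl_congr_inv_mem (fun tags => tags.length = (PySem.Str.split₀ text).length)
    · intro a b ha; exact step_len _ _ ha b
    · intro pr hpr a ha
      cases hp : PySem.Str.split₀ pr.1 with
      | nil => exact absurd hp (hitems pr hpr)
      | cons p0 ps =>
        exact step_core _ _ pr.2 p0 ps ha
    · simp

theorem convert_to_iob2_changed : Claim_changed_convert_to_iob2 := by
  unfold Claim_changed_convert_to_iob2; decide
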